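-- pv_equiv track=rewrite | github.com/MridulPathania01/DSA-practice | Day-11/Amazon-questions/DEshawAmazon.py | arrRed
-- ===== SOURCE A (Python) =====
-- from typing import List
--
-- def arrRed(n: int, arr: List[int]) -> List[int]:
--     result=[]
--     while arr:
--         k = min(n, len(arr))
--         mex = 0
--         seen = set(arr[:k])
--         while mex in seen:
--             mex+=1
--         result.append(mex)
--         arr = arr[k:]
--     return result
-- ===== SOURCE B (Python) =====
-- from typing import List
--
--
-- def _chunk_mex(svals: List[int]) -> int:
--     # svals is sorted; scan for the first missing non-negative integer
--     expected = 0
--     for v in svals: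
--         if v > expected:
--             break
--         if v == expected:
--             expected += 1
--     return expected
--
--
-- def arrRed(n: int, arr: List[int]) -> List[int]:
--     if not arr:
--         return []
--     return [_chunk_mex(sorted(arr[i:i + n])) for i in range(0, len(arr), n)]
-- ===== Notes on version B (the rewrite author's own statement) =====
-- stated objective: alternative
-- what changed: B replaces the destructive while-loop (re-slicing the remaining list with arr = arr[k:] each pass and probing a hash set for successive mex candidates) by a single index-stepped comprehension over range(0, len(arr), n), computing each chunk's mex by sorting the chunk and scanning it once with an 'expected' counter.
import Mathlib
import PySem

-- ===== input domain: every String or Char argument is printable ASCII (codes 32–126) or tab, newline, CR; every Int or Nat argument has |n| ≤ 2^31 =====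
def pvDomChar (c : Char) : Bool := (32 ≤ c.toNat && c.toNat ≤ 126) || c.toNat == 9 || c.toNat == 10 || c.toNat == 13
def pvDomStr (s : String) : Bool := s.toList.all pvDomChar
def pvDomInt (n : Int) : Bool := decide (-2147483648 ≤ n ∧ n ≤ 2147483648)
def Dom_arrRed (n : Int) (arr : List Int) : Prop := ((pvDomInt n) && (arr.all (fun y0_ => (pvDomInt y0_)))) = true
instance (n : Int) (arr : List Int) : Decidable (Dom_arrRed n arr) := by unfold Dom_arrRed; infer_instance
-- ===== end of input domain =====

-- B replaces A's destructive while-loop (list re-slicing + per-chunk set build with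
-- successive membership probes) by one index-stepped map over range(0, len, n),
-- computing each chunk's mex by a single scan of the sorted chunk; objective: alternative.

-- ===== PORT A =====
-- 'while mex in seen: mex += 1' — fuel |seen|+1 suffices: mex can be bumped at
-- most once per distinct element of seen.
def mexProbe (seen : PySem.Set Int) (mex : Int) : Nat → Int
  | 0 => mex
  | f + 1 => if mex ∈ seen then mexProbe seen (mex + 1) f else mex

-- 'while arr:' loop; fuel arr.length suffices when n ≥ 1 (each pass drops k ≥ 1 elements).
def arrRedLoop (n : Int) : Nat → List Int → List Int → List Int
  | 0, _, result => result
  | f + 1, arr, result =>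
    if arr = [] then result
    else
      let k := min n (arr.length : Int)
      let seen := PySem.Set.ofList (PySem.List.slice arr none (some k))
      let mex := mexProbe seen 0 (seen.length + 1)
      arrRedLoop n f (PySem.List.slice arr (some k) none) (result ++ [mex])

def arrRed (n : Int) (arr : List Int) : List Int := arrRedLoop n arr.length arr []

-- ===== PORT B =====
-- '_chunk_mex': 'for v in svals: …' with break, tracking 'expected'.
def mexScan (expected : Int) : List Int → Int
  | [] => expected
  | v :: rest =>
    if v > expected then expected
    else if v = expected then mexScan (expected + 1) rest
    else mexScan expected rest

-- '[_chunk_mex(sorted(arr[i:i+n])) for i in range(0, len(arr), n)]'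
def arrRed_alt (n : Int) (arr : List Int) : List Int :=
  if arr = [] then []
  else
    (PySem.List.pyRange 0 (arr.length : Int) n).map
      (fun i => mexScan 0
        (PySem.List.sorted (PySem.List.slice arr (some i) (some (i + n))) (fun x => x) false))

-- ===== PRECONDITION & SPEC =====
-- Pre_ excludes only nonempty arr with n ≤ 0, where Python A never terminates
-- (the chunk pointer never advances), so A returns on exactly the Pre_ inputs.
def Pre_arrRed (n : Int) (arr : List Int) : Prop := arr = [] ∨ 1 ≤ n
instance (n : Int) (arr : List Int) : Decidable (Pre_arrRed n arr) := by unfold Pre_arrRed; infer_instance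

def pvWitness_arrRed : Int × List Int := (2, [0, 1, 5])

def Spec_arrRed (n : Int) (arr : List Int) (out : List Int) : Prop := out = arrRed_alt n arr
instance (n : Int) (arr : List Int) (out : List Int) : Decidable (Spec_arrRed n arr out) := by unfold Spec_arrRed; infer_instance

-- ===== CLAIM =====
def Claim_equal_arrRed : Prop := ∀ (n : Int) (arr : List Int), Dom_arrRed n arr → Pre_arrRed n arr → Spec_arrRed n arr (arrRed n arr)

-- ===== LEMMAS AND PROOFS =====

-- The mex specification: r is ≥ lo, not in l, and every value in [lo, r) is in l.
def IsMexFrom (l : List Int) (lo r : Int) : Prop :=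
  lo ≤ r ∧ r ∉ l ∧ ∀ j : Int, lo ≤ j → j < r → j ∈ l

theorem isMexFrom_unique {l : List Int} {lo r s : Int}
    (hr : IsMexFrom l lo r) (hs : IsMexFrom l lo s) : r = s := by
  rcases hr with ⟨hr0, hrn, hrb⟩
  rcases hs with ⟨hs0, hsn, hsb⟩
  by_contra hne
  rcases lt_or_gt_of_ne hne with h | h
  · exact hrn (hsb r hr0 h)
  · exact hsn (hrb s hs0 h)

theorem mexProbe_spec (seen : List Int) :
    ∀ (fuel : Nat) (m : Int),
      (seen.filter (fun x => m ≤ x)).length < fuel →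
      IsMexFrom seen m (mexProbe seen m fuel) := by
  intro fuel
  induction fuel with
  | zero => intro m h; omega
  | succ f ih =>
    intro m h
    by_cases hm : m ∈ seen
    · have hstep : mexProbe seen m (f + 1) = mexProbe seen (m + 1) f := by
        simp [mexProbe, hm]
      have hlt : (seen.filter (fun x => m + 1 ≤ x)).length <
          (seen.filter (fun x => m ≤ x)).length := by
        have hsub : seen.filter (fun x => m + 1 ≤ x) =
            (seen.filter (fun x => m ≤ x)).filter (fun x => ¬ (x = m)) := by
          rw [List.filter_filter]
          apply List.filter_congr
          intro x _
          by_cases hx : x = m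
          · simp [hx]
          · simp [hx]; omega
        rw [hsub]
        apply List.length_filter_lt_length_iff_exists.mpr
        exact ⟨m, by simpa using hm, by simp⟩
      have := ih (m + 1) (by omega)
      rw [hstep]
      rcases this with ⟨h0, hn, hb⟩
      refine ⟨by omega, hn, ?_⟩
      intro j hj1 hj2
      rcases eq_or_lt_of_le hj1 with he | hlt'
      · exact he ▸ hm
      · exact hb j (by omega) hj2
    · simp [mexProbe, hm]
      exact ⟨le_refl m, hm, fun j h1 h2 => by omega⟩

theorem mexScan_spec : ∀ (s : List Int), s.Pairwise (· ≤ ·) →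
    ∀ (e : Int), IsMexFrom s e (mexScan e s) := by
  intro s
  induction s with
  | nil =>
    intro _ e
    simp only [mexScan]
    exact ⟨le_refl e, by simp, fun j h1 h2 => by omega⟩
  | cons v rest ih =>
    intro hp e
    have hrest := List.Pairwise.of_cons hp
    have hhead : ∀ y ∈ rest, v ≤ y := fun y hy => List.rel_of_pairwise_cons hp hy
    by_cases h1 : v > e
    · simp [mexScan, h1]
      refine ⟨le_refl e, ?_, fun j hj1 hj2 => by omega⟩
      intro hmem
      rcases List.mem_cons.mp hmem with h | h
      · omega
      · have := hhead e h; omega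
    · by_cases h2 : v = e
      · have hs : mexScan e (v :: rest) = mexScan (e + 1) rest := by
          simp [mexScan, h2]
        rw [hs]
        rcases ih hrest (e + 1) with ⟨h0, hn, hb⟩
        refine ⟨by omega, ?_, ?_⟩
        · intro hmem
          rcases List.mem_cons.mp hmem with h | h
          · omega
          · exact hn h
        · intro j hj1 hj2
          rcases eq_or_lt_of_le hj1 with he | hlt'
          · simp [← he, h2]
          · exact List.mem_cons_of_mem _ (hb j (by omega) hj2)
      · have hs : mexScan e (v :: rest) = mexScan e rest := by
          simp [mexScan, h1, h2]
        rw [hs]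
        rcases ih hrest e with ⟨h0, hn, hb⟩
        refine ⟨h0, ?_, ?_⟩
        · intro hmem
          rcases List.mem_cons.mp hmem with h | h
          · omega
          · exact hn h
        · intro j hj1 hj2
          exact List.mem_cons_of_mem _ (hb j hj1 hj2)

-- the two per-chunk mex computations agree on the same chunk
theorem mex_eq (chunk : List Int) :
    mexProbe (PySem.Set.ofList chunk) 0 ((PySem.Set.ofList chunk).length + 1) =
    mexScan 0 (PySem.List.sorted chunk (fun x => x) false) := by
  set seen := PySem.Set.ofList chunk with hseen
  have hprobe := mexProbe_spec seen (seen.length + 1) 0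
    (by have := List.length_filter_le (fun x => (0:Int) ≤ x) seen; omega)
  have hsorted : (PySem.List.sorted chunk (fun x : Int => x) false).Pairwise (· ≤ ·) := by
    have := PySem.List.sorted_pairwise chunk (fun x : Int => x)
    simpa using this
  have hscan := mexScan_spec _ hsorted 0
  have hmem1 : ∀ x : Int, x ∈ seen ↔ x ∈ chunk := fun x => PySem.Set.mem_ofList _ _
  have hmem2 : ∀ x : Int, x ∈ PySem.List.sorted chunk (fun y : Int => y) false ↔ x ∈ chunk :=
    fun x => PySem.List.mem_sorted _ _ _ _
  have h1 : IsMexFrom chunk 0 (mexProbe seen 0 (seen.length + 1)) := by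
    rcases hprobe with ⟨a, b, c⟩
    exact ⟨a, fun h => b ((hmem1 _).mpr h), fun j hj1 hj2 => (hmem1 _).mp (c j hj1 hj2)⟩
  have h2 : IsMexFrom chunk 0 (mexScan 0 (PySem.List.sorted chunk (fun x => x) false)) := by
    rcases hscan with ⟨a, b, c⟩
    exact ⟨a, fun h => b ((hmem2 _).mpr h), fun j hj1 hj2 => (hmem2 _).mp (c j hj1 hj2)⟩
  exact isMexFrom_unique h1 h2

-- range lemmas for a positive step
theorem pyRange_pos_nil {a b s : Int} (hs : 0 < s) (hab : b ≤ a) :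
    PySem.List.pyRange a b s = [] := by
  rw [PySem.List.pyRange_of_pos a b hs]
  simp [show ¬ a < b by omega]

theorem pyRange_pos_cons {a b s : Int} (hs : 0 < s) (hab : a < b) :
    PySem.List.pyRange a b s = a :: PySem.List.pyRange (a + s) b s := by
  rw [PySem.List.pyRange_of_pos a b hs, PySem.List.pyRange_of_pos (a + s) b hs]
  have hdiv : (b - a + s - 1) / s = (b - (a + s) + s - 1) / s + 1 := by
    have : b - a + s - 1 = (b - (a + s) + s - 1) + 1 * s := by ring
    rw [this, Int.add_mul_ediv_right _ _ (by omega : s ≠ 0)]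
  by_cases hab2 : a + s < b
  · have hnn : 0 ≤ (b - (a + s) + s - 1) / s := Int.ediv_nonneg (by omega) (by omega)
    rw [if_pos hab, if_pos hab2]
    have hcnt : (b - a + s - 1).toNat / 1 = (b - a + s - 1).toNat := by omega
    have : ((b - a + s - 1) / s).toNat = ((b - (a + s) + s - 1) / s).toNat + 1 := by omega
    rw [this, List.range_succ_eq_map]
    simp only [List.map_cons, List.map_map]
    refine List.cons_eq_cons.mpr ⟨by simp, List.map_congr_left ?_⟩
    intro k _
    simp [Function.comp]; ring
  · have hz : (b - (a + s) + s - 1) / s = 0 :=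
      Int.ediv_eq_zero_of_lt (by omega) (by omega)
    rw [if_pos hab, if_neg hab2]
    have h1 : (b - a + s - 1) / s = 1 := by omega
    rw [h1]
    simp [List.range_succ]

-- shifting a positive-step range
theorem pyRange_pos_shift {a b s : Int} (c : Int) (hs : 0 < s) :
    PySem.List.pyRange (a + c) (b + c) s = (PySem.List.pyRange a b s).map (· + c) := by
  rw [PySem.List.pyRange_of_pos _ _ hs, PySem.List.pyRange_of_pos a b hs]
  have h1 : b + c - (a + c) = b - a := by ring
  rw [h1, List.map_map]
  have h2 : (if a + c < b + c then ((b - a + s - 1) / s).toNat else 0) = (if a < b then ((b - a + s - 1) / s).toNat else 0) := by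
    by_cases h : a < b
    · rw [if_pos (by omega), if_pos h]
    · rw [if_neg (by omega), if_neg h]
  rw [h2]
  apply List.map_congr_left
  intro k _
  simp; ring

-- A's chunk (take min n len) is B's first chunk (take n)
theorem slice_take_min (n : Int) (arr : List Int) (hn : 1 ≤ n) :
    PySem.List.slice arr none (some (min n (arr.length : Int))) =
    PySem.List.slice arr none (some n) := by
  rw [PySem.List.slice_to arr (by omega), PySem.List.slice_to arr (by omega)]
  by_cases h : n ≤ (arr.length : Int)
  · congr 1; omega
  · rw [List.take_of_length_le (by omega), List.take_of_length_le (by omega)]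

-- A's remainder (drop min n len) is drop n
theorem slice_drop_min (n : Int) (arr : List Int) (hn : 1 ≤ n) :
    PySem.List.slice arr (some (min n (arr.length : Int))) none = arr.drop n.toNat := by
  rw [PySem.List.slice_from arr (by omega)]
  by_cases h : n ≤ (arr.length : Int)
  · congr 1; omega
  · rw [List.drop_eq_nil_of_le (by omega), List.drop_eq_nil_of_le (by omega)]

-- a later chunk of arr is the corresponding chunk of the dropped tail
theorem slice_chunk_shift (n i : Int) (arr : List Int) (hn : 1 ≤ n) (hi : 0 ≤ i) :
    PySem.List.slice arr (some (i + n)) (some (i + n + n)) =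
    PySem.List.slice (arr.drop n.toNat) (some i) (some (i + n)) := by
  rw [PySem.List.slice_toNat arr (by omega) (by omega), PySem.List.slice_toNat (arr.drop n.toNat) (by omega) (by omega)]
  rw [List.drop_drop]
  have h1 : n.toNat + i.toNat = (i + n).toNat := by omega
  have h2 : (i + n + n).toNat - (i + n).toNat = (i + n).toNat - i.toNat := by omega
  rw [h1, h2]

-- the main loop invariant: A's while-loop produces B's index-stepped map
theorem main_loop (n : Int) (hn : 1 ≤ n) :
    ∀ (m : Nat) (arr : List Int), arr.length ≤ m → ∀ (f : Nat) (acc : List Int), arr.length ≤ f →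
    arrRedLoop n f arr acc = acc ++ (PySem.List.pyRange 0 (arr.length : Int) n).map
      (fun i => mexScan 0
        (PySem.List.sorted (PySem.List.slice arr (some i) (some (i + n))) (fun x => x) false)) := by
  intro m
  induction m with
  | zero =>
    intro arr h f acc hf
    have ha : arr = [] := by
      cases arr with
      | nil => rfl
      | cons x xs => simp at h
    subst ha
    have hnil : PySem.List.pyRange 0 (0 : Int) n = [] := pyRange_pos_nil (by omega) le_rfl
    cases f with
    | zero => simp [arrRedLoop, hnil]
    | succ f' => simp [arrRedLoop, hnil]
  | succ m ih =>
    intro arr h f acc hf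
    by_cases ha : arr = []
    · subst ha
      have hnil : PySem.List.pyRange 0 (0 : Int) n = [] := pyRange_pos_nil (by omega) le_rfl
      cases f with
      | zero => simp [arrRedLoop, hnil]
      | succ f' => simp [arrRedLoop, hnil]
    · have hL : 1 ≤ arr.length := List.length_pos_iff.mpr ha
      cases f with
      | zero => omega
      | succ f' =>
        simp only [arrRedLoop, if_neg ha]
        rw [slice_take_min n arr hn, slice_drop_min n arr hn, mex_eq]
        have htl : (arr.drop n.toNat).length = arr.length - n.toNat := by simp
        have hcons : PySem.List.pyRange 0 (arr.length : Int) n =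
            0 :: PySem.List.pyRange (0 + n) (arr.length : Int) n :=
          pyRange_pos_cons (by omega) (by exact_mod_cast hL)
        rw [hcons, List.map_cons]
        rw [ih (arr.drop n.toNat) (by omega) f' (acc ++ [_]) (by omega)]
        have hrange : PySem.List.pyRange (0 + n) (arr.length : Int) n =
            (PySem.List.pyRange 0 ((arr.drop n.toNat).length : Int) n).map (· + n) := by
          by_cases hle : n ≤ (arr.length : Int)
          · have : (arr.length : Int) = (((arr.drop n.toNat).length : Int)) + n := by
              rw [htl]; omega
            rw [this, pyRange_pos_shift n (by omega)]
          · have h1 : PySem.List.pyRange (0 + n) (arr.length : Int) n = [] :=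
              pyRange_pos_nil (by omega) (by omega)
            have h2 : ((arr.drop n.toNat).length : Int) = 0 := by rw [htl]; omega
            rw [h1, h2, pyRange_pos_nil (by omega) (by omega), List.map_nil]
        rw [hrange, List.map_map]
        have hfun : ∀ i ∈ PySem.List.pyRange 0 (((arr.drop n.toNat).length : Int)) n,
            ((fun i => mexScan 0 (PySem.List.sorted (PySem.List.slice arr (some i) (some (i + n))) (fun x => x) false)) ∘ (· + n)) i =
            mexScan 0 (PySem.List.sorted (PySem.List.slice (arr.drop n.toNat) (some i) (some (i + n))) (fun x => x) false) := by
          intro i hi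
          have hi0 : 0 ≤ i := by
            have := (PySem.List.mem_pyRange_iff_of_pos (by omega : (0:Int) < n) i).mp hi
            omega
          simp only [Function.comp]
          rw [slice_chunk_shift n i arr hn hi0]
        rw [List.map_congr_left hfun]
        simp

-- ===== VERDICT =====
theorem arrRed_spec : Claim_equal_arrRed := by
  intro n arr _ hpre
  unfold Spec_arrRed arrRed arrRed_alt
  by_cases ha : arr = []
  · subst ha; simp [arrRedLoop]
  · have hn : 1 ≤ n := by
      rcases hpre with h | h
      · exact absurd h ha
      · exact h
    rw [if_neg ha, main_loop n hn arr.length arr le_rfl arr.length [] le_rfl]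
    -- B's first-chunk slice starts at 0: arr[0:n] = arr[:n]
    simp
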